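-- pv_equiv track=rewrite | github.com/wellnessapp71-cell/wellness-app | GYM 3/GYM/src/yoga_assessor.py | _determine_yoga_level
-- ===== SOURCE A (Python) =====
-- from typing import Dict, List, Tuple
--
-- def _determine_yoga_level(scores: Dict[str, str]) -> str:
--     """Determine overall yoga level based on individual scores"""
--     # Count levels
--     level_counts = {"beginner": 0, "intermediate": 0, "advanced": 0, "expert": 0}
--
--     for level in scores.values():
--         level_counts[level] += 1
--
--     # Find the most common level
--     max_count = max(level_counts.values())
--     most_common_levels = [level for level, count in level_counts.items() if count == max_count]
--
--     # If there's a tie, choose the lower level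
--     if len(most_common_levels) > 1:
--         level_order = ["beginner", "intermediate", "advanced", "expert"]
--         return min(most_common_levels, key=lambda x: level_order.index(x))
--
--     return most_common_levels[0]
-- ===== SOURCE B (Python) =====
-- def _determine_yoga_level(scores):
--     """Determine overall yoga level based on individual scores"""
--     counts = {"beginner": 0, "intermediate": 0, "advanced": 0, "expert": 0}
--     for level in scores.values():
--         counts[level] += 1
--     best = "beginner"
--     for level in ("intermediate", "advanced", "expert"):
--         if counts[level] > counts[best]:
--             best = level
--     return best
-- ===== Notes on version B (the rewrite author's own statement) =====
-- stated objective: simpler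
-- what changed: Replaces the max(values)/filter/min-by-index triple with a single argmax scan of the ordered level list using strict '>', which resolves ties to the lower level by construction.
import Mathlib
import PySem

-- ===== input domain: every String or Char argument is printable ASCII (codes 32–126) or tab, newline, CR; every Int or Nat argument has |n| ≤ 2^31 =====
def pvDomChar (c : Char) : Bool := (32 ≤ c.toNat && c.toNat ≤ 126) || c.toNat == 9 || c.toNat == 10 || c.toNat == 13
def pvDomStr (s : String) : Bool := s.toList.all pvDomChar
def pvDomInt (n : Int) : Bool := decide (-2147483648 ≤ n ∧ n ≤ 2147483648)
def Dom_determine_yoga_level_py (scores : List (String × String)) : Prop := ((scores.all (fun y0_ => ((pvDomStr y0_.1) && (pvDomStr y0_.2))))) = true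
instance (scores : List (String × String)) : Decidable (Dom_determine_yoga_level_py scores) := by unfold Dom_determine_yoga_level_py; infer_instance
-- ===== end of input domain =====

-- B replaces A's max(values)/filter/min-by-index selection with a single argmax scan over the ordered level list (simpler decomposition; same counting pass, same O(n) cost).


-- ===== PORT A =====
-- Python's min(xs, key=f): first element with minimal key; Python raises on empty xs, but A
-- only applies it to a nonempty list, so the "" default branch is unreachable.
def pyMinByKey (xs : List String) (key : String → Int) : String :=
  match xs with
  | [] => ""
  | h :: t => t.foldl (fun m x => if key x < key m then x else m) h

-- level_order.index(x) as an Int key; Python raises ValueError when x is absent, but A only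
-- applies it to keys of level_counts, which are the four levels, so the getD 0 is unreachable.
def lvlIdx (x : String) : Int := ((PySem.List.index? ["beginner", "intermediate", "advanced", "expert"] x).getD 0 : Int)

def determine_yoga_level_py (scores : List (String × String)) : String :=
  -- level_counts = {...}; for level in scores.values(): level_counts[level] += 1
  -- (Python raises KeyError on a level outside the four keys; `modify` inserts instead —
  --  exact on Pre_, where every value is one of the four keys.)
  let lc0 : PySem.Dict String Int :=
    PySem.Dict.ofList [("beginner", 0), ("intermediate", 0), ("advanced", 0), ("expert", 0)]
  let level_counts := (scores.map (·.2)).foldl (fun d lv => d.modify lv 0 (· + 1)) lc0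
  -- max_count = max(level_counts.values())  (values is nonempty, so the getD 0 is unreachable)
  let max_count := (PySem.List.max? level_counts.values (fun x => x)).getD 0
  let most_common_levels :=
    (level_counts.items.filter (fun p => p.2 == max_count)).map (·.1)
  if 1 < most_common_levels.length then
    pyMinByKey most_common_levels lvlIdx
  else
    most_common_levels.headD ""   -- most_common_levels[0]; the list is nonempty (max is attained)

-- ===== PORT B =====
def determine_yoga_level_py_alt (scores : List (String × String)) : String :=
  let counts0 : PySem.Dict String Int :=
    PySem.Dict.ofList [("beginner", 0), ("intermediate", 0), ("advanced", 0), ("expert", 0)]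
  let counts := (scores.map (·.2)).foldl (fun d lv => d.modify lv 0 (· + 1)) counts0
  ["intermediate", "advanced", "expert"].foldl
    (fun best lv => if counts.getD lv 0 > counts.getD best 0 then lv else best) "beginner"

-- ===== PRECONDITION & SPEC =====
-- Pre_ excludes exactly the inputs on which the Python A (and B alike) raises KeyError:
-- a score value that is not one of the four known levels.
def Pre_determine_yoga_level_py (scores : List (String × String)) : Prop :=
  ∀ p ∈ scores, p.2 ∈ (["beginner", "intermediate", "advanced", "expert"] : List String)
instance (scores : List (String × String)) : Decidable (Pre_determine_yoga_level_py scores) := by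
  unfold Pre_determine_yoga_level_py; infer_instance

def pvWitness_determine_yoga_level_py : (List (String × String)) :=
  [("warrior", "beginner"), ("tree", "intermediate"), ("crow", "intermediate")]

def Spec_determine_yoga_level_py (scores : List (String × String)) (out : String) : Prop := out = determine_yoga_level_py_alt scores
instance (scores : List (String × String)) (out : String) : Decidable (Spec_determine_yoga_level_py scores out) := by unfold Spec_determine_yoga_level_py; infer_instance

-- ===== CLAIM (what is proved, stated in full; the proofs are below) =====
def Claim_equal_determine_yoga_level_py : Prop := ∀ (scores : List (String × String)), Dom_determine_yoga_level_py scores → Pre_determine_yoga_level_py scores → Spec_determine_yoga_level_py scores (determine_yoga_level_py scores)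

-- ===== LEMMAS AND PROOFS =====

theorem idx_b : lvlIdx "beginner" = 0 := by decide
theorem idx_i : lvlIdx "intermediate" = 1 := by decide
theorem idx_a : lvlIdx "advanced" = 2 := by decide
theorem idx_e : lvlIdx "expert" = 3 := by decide

-- Core selection equivalence on four symbolic counts (m = their maximum).
set_option maxHeartbeats 8000000 in
theorem ports_sel (b i a e : Int) :
    (let lc : PySem.Dict String Int := PySem.Dict.mk
        [("beginner", b), ("intermediate", i), ("advanced", a), ("expert", e)]
     let max_count := (PySem.List.max? lc.values (fun x => x)).getD 0
     let mcl := (lc.items.filter (fun p => p.2 == max_count)).map (·.1)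
     if 1 < mcl.length then pyMinByKey mcl lvlIdx
     else mcl.headD "")
    =
    (let lc : PySem.Dict String Int := PySem.Dict.mk
        [("beginner", b), ("intermediate", i), ("advanced", a), ("expert", e)]
     ["intermediate", "advanced", "expert"].foldl
       (fun best lv => if lc.getD lv 0 > lc.getD best 0 then lv else best) "beginner") := by
  have hmc : ((PySem.List.max? (PySem.Dict.mk
      [("beginner", b), ("intermediate", i), ("advanced", a), ("expert", e)]).values
      (fun x : Int => x)).getD 0) = max (max (max b i) a) e := by
    have hv : (PySem.Dict.mk [("beginner", b), ("intermediate", i), ("advanced", a),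
        ("expert", e)]).values = [b, i, a, e] := by simp [PySem.Dict.values]
    rw [hv, PySem.List.max?_id_cons]; simp
  simp only [hmc]
  clear hmc
  generalize hM : max (max (max b i) a) e = m
  have hb : b ≤ m := hM ▸ le_trans (le_max_left b i) (le_trans (le_max_left _ a) (le_max_left _ e))
  have hi : i ≤ m := hM ▸ le_trans (le_max_right b i) (le_trans (le_max_left _ a) (le_max_left _ e))
  have ha : a ≤ m := hM ▸ le_trans (le_max_right _ a) (le_max_left _ e)
  have he : e ≤ m := hM ▸ le_max_right _ e
  have hmem : m = b ∨ m = i ∨ m = a ∨ m = e := by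
    subst hM
    rcases max_choice (max (max b i) a) e with h4 | h4
    · rcases max_choice (max b i) a with h3 | h3
      · rcases max_choice b i with h2 | h2
        · exact Or.inl (by rw [h4, h3, h2])
        · exact Or.inr (Or.inl (by rw [h4, h3, h2]))
      · exact Or.inr (Or.inr (Or.inl (by rw [h4, h3])))
    · exact Or.inr (Or.inr (Or.inr h4))
  clear hM
  by_cases hb1 : b = m <;> by_cases hi1 : i = m <;> by_cases ha1 : a = m <;> by_cases he1 : e = m <;>
    [skip; skip; skip; skip; skip; skip; skip; skip; skip; skip; skip; skip; skip; skip; skip; omega] <;>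
    simp [hb1, hi1, ha1, he1, pyMinByKey, idx_b, idx_i, idx_a, idx_e,
      PySem.Dict.getD_eq_get?_getD, PySem.Dict.get?_mk_cons] <;>
    (first | rfl | omega | (split_ifs <;> intros <;> first | rfl | omega | (exfalso; omega) | (simp_all <;> omega)))

theorem oflist_lit (b i a e : Int) :
    PySem.Dict.ofList [("beginner", b), ("intermediate", i), ("advanced", a), ("expert", e)]
    = PySem.Dict.mk [("beginner", b), ("intermediate", i), ("advanced", a), ("expert", e)] := by
  simp [PySem.Dict.ofList, PySem.Dict.update, PySem.Dict.insert, PySem.Dict.empty, PySem.Dict.contains]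

theorem modify_lit_b (b i a e : Int) :
    (PySem.Dict.mk [("beginner", b), ("intermediate", i), ("advanced", a), ("expert", e)]).modify "beginner" 0 (· + 1)
    = PySem.Dict.mk [("beginner", b + 1), ("intermediate", i), ("advanced", a), ("expert", e)] := by
  simp [PySem.Dict.modify, PySem.Dict.get?, PySem.Dict.insert, PySem.Dict.contains, PySem.Dict.getD]
theorem modify_lit_i (b i a e : Int) :
    (PySem.Dict.mk [("beginner", b), ("intermediate", i), ("advanced", a), ("expert", e)]).modify "intermediate" 0 (· + 1)
    = PySem.Dict.mk [("beginner", b), ("intermediate", i + 1), ("advanced", a), ("expert", e)] := by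
  simp [PySem.Dict.modify, PySem.Dict.get?, PySem.Dict.insert, PySem.Dict.contains, PySem.Dict.getD]
theorem modify_lit_a (b i a e : Int) :
    (PySem.Dict.mk [("beginner", b), ("intermediate", i), ("advanced", a), ("expert", e)]).modify "advanced" 0 (· + 1)
    = PySem.Dict.mk [("beginner", b), ("intermediate", i), ("advanced", a + 1), ("expert", e)] := by
  simp [PySem.Dict.modify, PySem.Dict.get?, PySem.Dict.insert, PySem.Dict.contains, PySem.Dict.getD]
theorem modify_lit_e (b i a e : Int) :
    (PySem.Dict.mk [("beginner", b), ("intermediate", i), ("advanced", a), ("expert", e)]).modify "expert" 0 (· + 1)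
    = PySem.Dict.mk [("beginner", b), ("intermediate", i), ("advanced", a), ("expert", e + 1)] := by
  simp [PySem.Dict.modify, PySem.Dict.get?, PySem.Dict.insert, PySem.Dict.contains, PySem.Dict.getD]

-- The counting loop in closed form (over any start values).
theorem counts_fold (l : List String)
    (h : ∀ x ∈ l, x ∈ (["beginner", "intermediate", "advanced", "expert"] : List String))
    (b i a e : Int) :
    l.foldl (fun d lv => d.modify lv 0 (· + 1))
      (PySem.Dict.mk [("beginner", b), ("intermediate", i), ("advanced", a), ("expert", e)])
    = PySem.Dict.mk
        [("beginner", b + l.count "beginner"), ("intermediate", i + l.count "intermediate"),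
         ("advanced", a + l.count "advanced"), ("expert", e + l.count "expert")] := by
  induction l generalizing b i a e with
  | nil => simp
  | cons x t ih =>
      have hx := h x (List.mem_cons_self ..)
      have ht : ∀ y ∈ t, y ∈ (["beginner", "intermediate", "advanced", "expert"] : List String) :=
        fun y hy => h y (List.mem_cons_of_mem _ hy)
      simp only [List.foldl_cons]
      simp only [List.mem_cons, List.not_mem_nil, or_false] at hx
      rcases hx with rfl | rfl | rfl | rfl
      · rw [modify_lit_b, ih ht]
        simp [List.count_cons]
        omega
      · rw [modify_lit_i, ih ht]
        simp [List.count_cons]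
        omega
      · rw [modify_lit_a, ih ht]
        simp [List.count_cons]
        omega
      · rw [modify_lit_e, ih ht]
        simp [List.count_cons]
        omega

-- ===== VERDICT (by name: the statement is the Claim_ definition above) =====
theorem determine_yoga_level_py_spec : Claim_equal_determine_yoga_level_py := by
  intro scores _ hpre
  unfold Spec_determine_yoga_level_py determine_yoga_level_py determine_yoga_level_py_alt
  have hl : ∀ x ∈ scores.map (·.2), x ∈ (["beginner", "intermediate", "advanced", "expert"] : List String) := by
    intro x hx
    rcases List.mem_map.1 hx with ⟨p, hp, rfl⟩
    exact hpre p hp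
  simp only [oflist_lit, counts_fold _ hl]
  exact ports_sel _ _ _ _
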